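-- pv_equiv track=rewrite | github.com/josergdev/SkyscrapersNxN-Backtracking | skyscrapersNxN.py | solve
-- ===== SOURCE A (Python) =====
-- from itertools import permutations
--
-- def solve(clues, board):
-- 	n = len(board)
-- 	next = find_empty(board)
-- 	if not next:
-- 		return True
-- 	else:
-- 		row, col = next
--
-- 	for i in range(1,n+1):
-- 		if valid(clues, board, i, (row,col)):
-- 			board[row][col] = i
-- 			if solve(clues, board):
-- 				return True
-- 			else:
-- 				board[row][col] = 0
--
-- 	return False
--
-- def find_empty(board):
-- 	n = len(board)
-- 	for i in range(n):
-- 		for j in range(n):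
-- 			if board[i][j] == 0:
-- 				return (i,j)
-- 	return None
--
-- def valid(clues, board, num, pos):
-- 	n = len(board)
-- 	row = [num if i == pos[1] else board[pos[0]][i] for i in range(n)]
-- 	col = [num if i == pos[0] else board[i][pos[1]] for i in range(n)]
--
-- 	# Check if num is not repeated in the row
-- 	if row.count(num) > 1:
-- 		return False
--
-- 	# Check if num is not repeated in the column
-- 	if col.count(num) > 1:
-- 		return False
--
-- 	# Check if num satisfy the top clue
-- 	clue = clues[pos[1]]
-- 	if clue != 0 and clue not in get_possible_clues_of_incompleted_row(col):
-- 		return False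
--
-- 	# Check if num satisfy the right clue
-- 	clue = clues[pos[0]+n]
-- 	if  clue != 0 and clue not in get_possible_clues_of_incompleted_row(row[::-1]):
-- 		return False
--
-- 	# Check if num satisfy the bot clue
-- 	clue = clues[::-1][pos[1]+n]
-- 	if clue != 0 and clue not in get_possible_clues_of_incompleted_row(col[::-1]):
-- 		return False
--
-- 	# Check if num satisfy the left clue
-- 	clue = clues[::-1][pos[0]]
-- 	if  clue != 0 and clue not in get_possible_clues_of_incompleted_row(row):
-- 		return False
--
-- 	return True
--
-- def get_clue_of_completed_row(row):
-- 	v = 0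
-- 	m = 0
-- 	for x in row:
-- 		if m < x:
-- 			v += 1
-- 		m = max(m, x)
-- 	return v
--
-- def get_possible_clues_of_incompleted_row(incompleted_row):
-- 	n = len(incompleted_row)
-- 	possible_rows = []
-- 	d = list(set([x for x in range(1,n+1)]) - set([x for x in incompleted_row if x != 0]))
-- 	for perm in permutations(d):
-- 		row = incompleted_row.copy()
-- 		for e in perm:
-- 			row[row.index(0)] = e
-- 		possible_rows.append(row)
-- 	possible_clues = set()
-- 	for r in possible_rows:
-- 		possible_clues.add(get_clue_of_completed_row(r))
-- 	return list(possible_clues)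
-- ===== SOURCE B (Python) =====
-- # B: recursion on the flat cell index (divmod) instead of re-scanning for the first empty
-- # cell, and each clue is decided by a short-circuiting DFS over the line (running max /
-- # visible count / unused values) instead of enumerating all permutations of the missing
-- # values and collecting their clues into a set.  Like A, solve fills `board` in place on
-- # success and restores the 0s on failure; the equivalence proved is about the return value.
--
-- def solve(clues, board):
--     n = len(board)
--
--     def vis(clue, line, m, cnt, rem):
--         if cnt > clue:
--             return False
--         if not line:
--             return cnt == clue
--         x = line[0]
--         if x != 0:
--             return vis(clue, line[1:], max(m, x), cnt + (1 if x > m else 0), rem)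
--         return any(vis(clue, line[1:], max(m, e), cnt + (1 if e > m else 0),
--                        [f for f in rem if f != e])
--                    for e in rem)
--
--     def line_ok(clue, line, missing):
--         return clue == 0 or vis(clue, line, 0, 0, missing)
--
--     def place_ok(r, c, v):
--         row = [board[r][j] for j in range(n)]
--         col = [board[i][c] for i in range(n)]
--         if v in row or v in col:
--             return False
--         row[c] = v
--         col[r] = v
--         mrow = [x for x in range(1, n + 1) if x not in row]
--         mcol = [x for x in range(1, n + 1) if x not in col]
--         return (line_ok(clues[c], col, mcol)
--                 and line_ok(clues[r + n], row[::-1], mrow)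
--                 and line_ok(clues[3 * n - 1 - c], col[::-1], mcol)
--                 and line_ok(clues[4 * n - 1 - r], row, mrow))
--
--     def fit(k):
--         if k == n * n:
--             return True
--         r, c = divmod(k, n)
--         if board[r][c] != 0:
--             return fit(k + 1)
--         for v in range(1, n + 1):
--             if place_ok(r, c, v):
--                 board[r][c] = v
--                 if fit(k + 1):
--                     return True
--                 board[r][c] = 0
--         return False
--
--     return fit(0)
-- ===== Notes on version B (the rewrite author's own statement) =====
-- stated objective: alternative
-- what changed: A repeatedly rescans the whole board for the first empty cell and decides each clue by enumerating every permutation of the missing values, building every completed line and collecting all visibility counts into a set before one membership test; B instead recurses on the flat cell index (divmod) so the scan for the next cell disappears, and decides each clue by a short-circuiting DFS over the line carrying the running maximum, visible count and unused values, pruning once the count exceeds the clue.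
-- outside the precondition, e.g. on solve([1, 0, 0], [[0]]): A returns True, B raises IndexError; on solve([1, 0, 0, 0, 2, 0, 2], [[2, 2], [0, -1, -1]]): A returns True, B returns False; on solve([2, 1, 0, 2, 1, 1, 2, 0], [[1, 3], [0, 2, 2]]): A returns False, B returns False
import Mathlib
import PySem

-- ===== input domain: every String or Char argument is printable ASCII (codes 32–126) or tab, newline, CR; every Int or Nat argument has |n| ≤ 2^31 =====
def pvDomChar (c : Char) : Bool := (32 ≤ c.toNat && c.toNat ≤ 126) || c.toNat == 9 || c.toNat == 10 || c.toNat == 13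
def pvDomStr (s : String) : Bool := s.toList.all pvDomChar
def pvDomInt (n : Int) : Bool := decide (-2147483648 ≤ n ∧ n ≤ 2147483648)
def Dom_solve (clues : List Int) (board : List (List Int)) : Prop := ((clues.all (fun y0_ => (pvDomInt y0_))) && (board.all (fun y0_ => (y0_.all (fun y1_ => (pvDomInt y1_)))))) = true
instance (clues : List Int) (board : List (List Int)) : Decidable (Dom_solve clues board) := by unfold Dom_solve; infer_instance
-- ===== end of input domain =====

-- B recurses on the flat cell index (divmod) instead of rescanning the board for the first empty
-- cell, and decides each clue by a short-circuiting DFS over the line (running maximum, visible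
-- count, unused values) instead of enumerating all permutations of the missing values and
-- collecting their clues into a set.  Like A, the Python B fills `board` in place on success and
-- restores the 0s on failure; the theorems below are about the RETURN value.

-- ===== PORT A =====

-- board[i][j]; the default 1 is only reachable outside Pre_solve (Python raises IndexError there)
def cellA (board : List (List Int)) (i j : Nat) : Int := (board.getD i []).getD j 1

def findEmptyA (board : List (List Int)) : Option (Nat × Nat) :=
  (List.range board.length).findSome? (fun i =>
    ((List.range board.length).find? (fun j => cellA board i j == 0)).map (fun j => (i, j)))

def getClueA (row : List Int) : Int :=
  (row.foldl (fun (p : Int × Int) x => (p.1 + (if p.2 < x then 1 else 0), max p.2 x)) (0, 0)).1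

-- row[row.index(0)] = e; Python raises ValueError when no 0 is left (unreachable under Pre_solve)
def setFirstZeroA : List Int → Int → List Int
  | [], _ => []
  | x :: xs, e => if x = 0 then e :: xs else x :: setFirstZeroA xs e

def fillZerosA (row : List Int) (perm : List Int) : List Int := perm.foldl setFirstZeroA row

def possibleCluesA (line : List Int) : List Int :=
  let d := (PySem.List.pyRange 1 ((line.length : Int) + 1) 1).filter
             (fun x => !((line.filter (fun y => !(y == 0))).contains x))
  PySem.Set.ofList ((PySem.List.permutations d d.length).map (fun p => getClueA (fillZerosA line p)))

def validA (clues : List Int) (board : List (List Int)) (num : Int) (pos : Nat × Nat) : Bool :=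
  let n := board.length
  let row := (List.range n).map (fun i => if i = pos.2 then num else cellA board pos.1 i)
  let col := (List.range n).map (fun i => if i = pos.1 then num else cellA board i pos.2)
  if 1 < row.count num then false
  else if 1 < col.count num then false
  else if clues.getD pos.2 0 != 0 && !((possibleCluesA col).contains (clues.getD pos.2 0)) then false
  else if clues.getD (pos.1 + n) 0 != 0 && !((possibleCluesA row.reverse).contains (clues.getD (pos.1 + n) 0)) then false
  else if clues.reverse.getD (pos.2 + n) 0 != 0 && !((possibleCluesA col.reverse).contains (clues.reverse.getD (pos.2 + n) 0)) then false
  else if clues.reverse.getD pos.1 0 != 0 && !((possibleCluesA row).contains (clues.reverse.getD pos.1 0)) then false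
  else true

def setCellA (board : List (List Int)) (r c : Nat) (v : Int) : List (List Int) :=
  board.set r ((board.getD r []).set c v)

def zerosA (board : List (List Int)) : Nat := (board.map (fun row => row.count 0)).sum

-- termination support for the port (cited in decreasing_by)
theorem findEmptyA_zero (board : List (List Int)) (r c : Nat) (h : findEmptyA board = some (r, c)) :
    r < board.length ∧ c < (board.getD r []).length ∧ (board.getD r []).getD c 1 = 0 := by
  unfold findEmptyA at h
  obtain ⟨i, hi, hf⟩ := List.exists_of_findSome?_eq_some h
  rw [Option.map_eq_some_iff] at hf
  obtain ⟨j, hj, hij⟩ := hf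
  cases hij
  have h0 : (board.getD r []).getD c 1 = 0 := by simpa [cellA] using List.find?_some hj
  refine ⟨List.mem_range.mp hi, ?_, h0⟩
  by_contra hlen
  rw [List.getD_eq_default _ _ (by omega)] at h0
  omega

theorem pv_sum_set_lt (L : List Nat) (r : Nat) (y : Nat) (hr : r < L.length) (hy : y < L[r]) :
    (L.set r y).sum < L.sum := by
  conv_rhs => rw [← List.set_getElem_self (as := L) (h := hr)]
  rw [List.set_eq_take_append_cons_drop, if_pos hr,
      List.set_eq_take_append_cons_drop, if_pos hr]
  simp only [List.sum_append, List.sum_cons]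
  omega

theorem pv_count_zero_set_lt (row : List Int) (c : Nat) (v : Int)
    (hc : c < row.length) (h0 : row.getD c 1 = 0) (hv : v ≠ 0) :
    (row.set c v).count 0 < row.count 0 := by
  rw [List.getD_eq_getElem _ _ hc] at h0
  have hmem : (0 : Int) ∈ row := h0 ▸ List.getElem_mem hc
  have hpos : 0 < row.count (0 : Int) := List.count_pos_iff.mpr hmem
  rw [List.count_set hc]
  simp [h0, hv]
  omega

theorem zerosA_set_lt (board : List (List Int)) (r c : Nat) (v : Int)
    (hr : r < board.length) (hc : c < (board.getD r []).length)
    (h0 : (board.getD r []).getD c 1 = 0) (hv : v ≠ 0) :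
    zerosA (setCellA board r c v) < zerosA board := by
  unfold zerosA setCellA
  rw [List.map_set]
  have hr' : r < (List.map (fun row => List.count 0 row) board).length := by simpa using hr
  refine pv_sum_set_lt _ _ _ hr' ?_
  have hg : (List.map (fun row => List.count 0 row) board)[r]'hr' = List.count 0 (board[r]'hr) := by
    simp
  rw [List.getD_eq_getElem _ _ hr] at hc h0
  rw [hg, List.getD_eq_getElem _ _ hr]
  exact pv_count_zero_set_lt _ _ _ hc h0 hv

def solve (clues : List Int) (board : List (List Int)) : Bool :=
  match h : findEmptyA board with
  | none => true
  | some (r, c) =>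
    (PySem.List.pyRange 1 ((board.length : Int) + 1) 1).attach.any (fun i =>
      validA clues board i.1 (r, c) && solve clues (setCellA board r c i.1))
termination_by zerosA board
decreasing_by
  obtain ⟨h1, h2, h3⟩ := findEmptyA_zero board r c h
  exact zerosA_set_lt board r c i.1 h1 h2 h3
    (by have := (PySem.List.mem_pyRange_one.mp i.2).1; omega)

-- ===== PORT B =====

-- vis: DFS over the remaining line with running maximum m, visible count cnt, unused values rem
def visB (clue : Int) : List Int → Int → Int → List Int → Bool
  | line, m, cnt, rem =>
    if clue < cnt then false
    else match line with
      | [] => cnt == clue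
      | x :: s =>
        if x != 0 then visB clue s (max m x) (cnt + if m < x then 1 else 0) rem
        else rem.any (fun e => visB clue s (max m e) (cnt + if m < e then 1 else 0)
                        (rem.filter (fun f => !(f == e))))
termination_by line => line.length

def lineOkB (clue : Int) (line missing : List Int) : Bool :=
  (clue == 0) || visB clue line 0 0 missing

def placeOkB (clues : List Int) (board : List (List Int)) (n r c : Nat) (v : Int) : Bool :=
  let row := (List.range n).map (fun j => (board.getD r []).getD j 1)
  let col := (List.range n).map (fun i => (board.getD i []).getD c 1)
  if row.contains v || col.contains v then false
  else
    let row' := row.set c v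
    let col' := col.set r v
    let mrow := (PySem.List.pyRange 1 ((n : Int) + 1) 1).filter (fun x => !(row'.contains x))
    let mcol := (PySem.List.pyRange 1 ((n : Int) + 1) 1).filter (fun x => !(col'.contains x))
    lineOkB (clues.getD c 0) col' mcol &&
      (lineOkB (clues.getD (r + n) 0) row'.reverse mrow &&
        (lineOkB (clues.getD (3 * n - 1 - c) 0) col'.reverse mcol &&
          lineOkB (clues.getD (4 * n - 1 - r) 0) row' mrow))

def setCellB (board : List (List Int)) (r c : Nat) (v : Int) : List (List Int) :=
  board.set r ((board.getD r []).set c v)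

-- fit(k): recursion on the flat index; the `≤` in the stop test makes the recursion total
-- (Python only ever reaches k = n*n exactly)
def fitB (clues : List Int) (n : Nat) (board : List (List Int)) (k : Nat) : Bool :=
  if n * n ≤ k then true
  else
    let r := k / n
    let c := k % n
    if (board.getD r []).getD c 1 != 0 then fitB clues n board (k + 1)
    else (PySem.List.pyRange 1 ((n : Int) + 1) 1).any (fun v =>
      placeOkB clues board n r c v && fitB clues n (setCellB board r c v) (k + 1))
termination_by n * n - k
decreasing_by all_goals omega

def solve_alt (clues : List Int) (board : List (List Int)) : Bool :=
  fitB clues board.length board 0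

-- ===== PRECONDITION & SPEC =====
-- Pre_ admits (a) boards whose scanned n×n prefix is completely filled (A returns True without
-- reading the clues) and (b) well-formed puzzles: square board, 4n clues, entries in 0..n with no
-- duplicated nonzero value in any row or column.  Outside (a)/(b) A generally raises
-- IndexError/ValueError (clue lookups out of range, row.index(0) on a row with too few zeros);
-- on the few malformed boards where every candidate happens to fail an early check,
-- A still returns — those inputs are excluded here as artefacts of A's check order.
def Pre_solve (clues : List Int) (board : List (List Int)) : Prop :=
  (∀ row ∈ board, board.length ≤ row.length ∧ ∀ j < board.length, row.getD j 1 ≠ 0)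
  ∨ (clues.length = 4 * board.length
     ∧ (∀ row ∈ board, row.length = board.length
         ∧ (∀ x ∈ row, 0 ≤ x ∧ x ≤ (board.length : Int))
         ∧ (row.filter (fun x => !(x == 0))).Nodup)
     ∧ (∀ j < board.length, ((board.map (fun row => row.getD j 1)).filter (fun x => !(x == 0))).Nodup))

instance (clues : List Int) (board : List (List Int)) : Decidable (Pre_solve clues board) := by
  unfold Pre_solve; infer_instance

def pvWitness_solve : List Int × List (List Int) := ([0, 0, 0, 0], [[0]])

def Spec_solve (clues : List Int) (board : List (List Int)) (out : Bool) : Prop := out = solve_alt clues board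
instance (clues : List Int) (board : List (List Int)) (out : Bool) : Decidable (Spec_solve clues board out) := by unfold Spec_solve; infer_instance

-- ===== CLAIM (what is proved, stated in full; the proofs are below) =====
def Claim_equal_solve : Prop := ∀ (clues : List Int) (board : List (List Int)), Dom_solve clues board → Pre_solve clues board → Spec_solve clues board (solve clues board)

-- ===== LEMMAS AND PROOFS =====

-- flat-index arithmetic: the pair (i, j) has flat index i*n + j
theorem pv_flat_div (n i j : Nat) (hn : 0 < n) (hj : j < n) :
    (i * n + j) / n = i ∧ (i * n + j) % n = j := by
  constructor
  · rw [Nat.add_comm, Nat.add_mul_div_right _ _ hn, Nat.div_eq_of_lt hj]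
    omega
  · rw [Nat.add_comm, Nat.add_mul_mod_self_right, Nat.mod_eq_of_lt hj]

-- dropping .attach from an any over the candidate list
theorem pv_any_attach (l : List Int) (f : Int → Bool) :
    l.attach.any (fun x => f x.1) = l.any f := by
  induction l with
  | nil => rfl
  | cons a l ih => simpa [List.any_cons] using congrArg (a := f a) (· || ·) ih

-- getD through set at a different index
theorem pv_getD_set_ne {α : Type} (l : List α) (r i : Nat) (x d : α) (h : i ≠ r) :
    (l.set r x).getD i d = l.getD i d := by
  by_cases hi : i < l.length
  · rw [List.getD_eq_getElem _ _ (by simpa using hi), List.getD_eq_getElem _ _ hi,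
      List.getElem_set_ne (by omega)]
  · rw [List.getD_eq_default _ _ (by simpa using hi), List.getD_eq_default _ _ (by omega)]

theorem pv_getD_set_self {α : Type} (l : List α) (r : Nat) (x d : α) (h : r < l.length) :
    (l.set r x).getD r d = x := by
  rw [List.getD_eq_getElem _ _ (by simpa using h)]
  exact List.getElem_set_self _

-- the cell of a board after one placement
theorem pv_cell_setCell (board : List (List Int)) (r c i j : Nat) (v : Int)
    (hr : r < board.length) (hne : ¬(i = r ∧ j = c)) :
    ((setCellA board r c v).getD i []).getD j 1 = (board.getD i []).getD j 1 := by
  unfold setCellA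
  by_cases hir : i = r
  · subst hir
    rw [pv_getD_set_self _ _ _ _ hr]
    exact pv_getD_set_ne _ _ _ _ _ (by tauto)
  · rw [pv_getD_set_ne _ _ _ _ _ hir]

theorem pv_cell_setCell_self (board : List (List Int)) (r c : Nat) (v : Int)
    (hr : r < board.length) (hc : c < (board.getD r []).length) :
    ((setCellA board r c v).getD r []).getD c 1 = v := by
  unfold setCellA
  rw [pv_getD_set_self _ _ _ _ hr, pv_getD_set_self _ _ _ _ hc]

-- a board all of whose scanned n×n cells are filled has no empty cell
theorem pv_no_empty (board : List (List Int))
    (h : ∀ i j, i < board.length → j < board.length → (board.getD i []).getD j 1 ≠ 0) :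
    findEmptyA board = none := by
  unfold findEmptyA
  rw [List.findSome?_eq_none_iff]
  intro i hi
  rw [Option.map_eq_none_iff, List.find?_eq_none]
  intro j hj
  simpa [cellA] using h i j (List.mem_range.mp hi) (List.mem_range.mp hj)

-- a find / findSome over range returns its first hit
theorem pv_find_range (n c : Nat) (p : Nat → Bool) (hc : c < n)
    (hnone : ∀ j, j < c → p j = false) (hp : p c = true) :
    (List.range n).find? p = some c := by
  have hsplit : List.range n = List.range c ++ List.map (fun x => c + x) (List.range (n - c)) := by
    rw [← List.range_add]; congr 1; omega
  rw [hsplit, List.find?_append]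
  have hfst : (List.range c).find? p = none := by
    rw [List.find?_eq_none]
    intro j hj
    simpa using hnone j (List.mem_range.mp hj)
  rw [hfst]
  have hnc : n - c = (n - c - 1) + 1 := by omega
  rw [hnc, List.range_succ_eq_map, List.map_cons, List.find?_cons]
  have : p (c + 0) = true := by simpa using hp
  rw [this]
  simp

theorem pv_findSome_range {α : Type} (n r : Nat) (f : Nat → Option α) (a : α) (hr : r < n)
    (hnone : ∀ i, i < r → f i = none) (hsome : f r = some a) :
    (List.range n).findSome? f = some a := by
  have hsplit : List.range n = List.range r ++ List.map (fun x => r + x) (List.range (n - r)) := by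
    rw [← List.range_add]; congr 1; omega
  rw [hsplit, List.findSome?_append]
  have hfst : (List.range r).findSome? f = none := by
    rw [List.findSome?_eq_none_iff]
    intro i hi
    exact hnone i (List.mem_range.mp hi)
  rw [hfst]
  have hnr : n - r = (n - r - 1) + 1 := by omega
  rw [hnr, List.range_succ_eq_map, List.map_cons, List.findSome?_cons]
  have : f (r + 0) = some a := by simpa using hsome
  rw [this]
  rfl

-- A's find_empty returns the first empty cell in flat order
theorem pv_find_at (board : List (List Int)) (k : Nat)
    (hk : k < board.length * board.length)
    (hinv : ∀ m, m < k → (board.getD (m / board.length) []).getD (m % board.length) 1 ≠ 0)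
    (h0 : (board.getD (k / board.length) []).getD (k % board.length) 1 = 0) :
    findEmptyA board = some (k / board.length, k % board.length) := by
  have hn : 0 < board.length := by by_contra h; simp [Nat.le_zero.mp (Nat.not_lt.mp h)] at hk
  set n := board.length with hnn
  have hr : k / n < n := Nat.div_lt_iff_lt_mul hn |>.mpr hk
  have hc : k % n < n := Nat.mod_lt _ hn
  have hkeq : n * (k / n) + k % n = k := Nat.div_add_mod k n
  have hcell : ∀ i j, i < n → j < n → i * n + j < k → cellA board i j ≠ 0 := by
    intro i j hi hj hm
    obtain ⟨hd, hmd⟩ := pv_flat_div n i j hn hj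
    have := hinv (i * n + j) hm
    rw [hd, hmd] at this
    exact this
  unfold findEmptyA
  rw [← hnn]
  apply pv_findSome_range n (k / n) _ _ hr
  · intro i hi
    rw [Option.map_eq_none_iff, List.find?_eq_none]
    intro j hj
    have hj' := List.mem_range.mp hj
    have hm : i * n + j < k := by
      have h1 : (i + 1) * n = i * n + n := Nat.succ_mul i n
      have h2 : (i + 1) * n ≤ (k / n) * n := Nat.mul_le_mul_right n (by omega)
      have h3 : (k / n) * n = n * (k / n) := Nat.mul_comm _ _
      omega
    simpa using hcell i j (by omega) hj' hm
  · have hrow : (List.range n).find? (fun j => cellA board (k / n) j == 0) = some (k % n) := by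
      apply pv_find_range n (k % n) _ hc
      · intro j hj
        have hm : (k / n) * n + j < k := by
          have h3 : (k / n) * n = n * (k / n) := Nat.mul_comm _ _
          omega
        simpa using hcell (k / n) j hr (by omega) hm
      · simpa [cellA] using h0
    rw [hrow]
    rfl

-- the duplicate test: A counts num in the updated line, B tests membership in the original
theorem pv_dup_contains (L : List Int) (c : Nat) (num : Int)
    (hc : c < L.length) (h0 : L[c]'hc = 0) (hnum : num ≠ 0) :
    decide (1 < (L.set c num).count num) = L.contains num := by
  have hcount : (L.set c num).count num = L.count num + 1 := by
    rw [List.count_set hc]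
    have h1 : (L[c]'hc == num) = false := by rw [h0]; simpa using fun h => hnum h.symm
    simp [h1]
  rw [hcount]
  cases hmem : L.contains num with
  | true =>
    have := List.count_pos_iff.mpr (List.contains_iff_mem.mp hmem)
    simp only [decide_eq_true_eq]; omega
  | false =>
    have : num ∉ L := fun h => by rw [List.contains_iff_mem.mpr h] at hmem; cases hmem
    have hz := List.count_eq_zero.mpr this
    simp only [hz, decide_eq_false_iff_not]; omega

-- B's original row/column maps are the row / the column of the board
theorem pv_rowO_eq (board : List (List Int)) (r : Nat)
    (hrl : (board.getD r []).length = board.length) :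
    (List.range board.length).map (fun j => (board.getD r []).getD j 1) = board.getD r [] := by
  apply List.ext_getElem
  · rw [List.length_map, List.length_range, hrl]
  · intro j h1 h2
    simp only [List.getElem_map, List.getElem_range]
    rw [List.getD_eq_getElem _ _ (by omega)]

theorem pv_colO_eq (board : List (List Int)) (c : Nat) :
    (List.range board.length).map (fun i => (board.getD i []).getD c 1)
      = board.map (fun row => row.getD c 1) := by
  apply List.ext_getElem
  · simp
  · intro j h1 h2
    simp only [List.getElem_map, List.getElem_range]
    have hj : j < board.length := by simpa using h1
    rw [List.getD_eq_getElem board [] hj]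

-- itertools.permutations, characterised up to permutation
theorem pv_permutations_mem_step (xs : List Int) (r i : Nat) (a : Int) (p : List Int)
    (hi : i < xs.length) (ha : xs[i]? = some a)
    (hp : p ∈ PySem.List.permutations (xs.eraseIdx i) r) :
    a :: p ∈ PySem.List.permutations xs (r + 1) := by
  rw [PySem.List.permutations, List.mem_flatMap]
  refine ⟨i, List.mem_range.mpr hi, ?_⟩
  rw [ha]
  exact List.mem_map.mpr ⟨p, hp, rfl⟩

theorem pv_mem_permutations_of_perm (p : List Int) :
    ∀ d : List Int, d.Nodup → p.Perm d → p ∈ PySem.List.permutations d d.length := by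
  induction p with
  | nil =>
    intro d _ hp
    have : d = [] := hp.nil_eq.symm
    subst this
    simp [PySem.List.permutations_zero]
  | cons e p' ih =>
    intro d hnd hp
    rw [List.cons_perm_iff_perm_erase] at hp
    obtain ⟨he, hp'⟩ := hp
    have hpos : 0 < d.length := List.length_pos_of_mem he
    have hlen : d.length = (d.erase e).length + 1 := by
      rw [List.length_erase_of_mem he]; omega
    have hidx : d.idxOf e < d.length := List.idxOf_lt_length_of_mem he
    have hget : d[d.idxOf e]'hidx = e := List.getElem_idxOf hidx
    have hsome : d[d.idxOf e]? = some e := by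
      rw [List.getElem?_eq_getElem hidx, hget]
    have herase : d.eraseIdx (d.idxOf e) = d.erase e := by
      have h2 := List.Nodup.erase_getElem hnd (d.idxOf e) hidx
      rw [hget] at h2
      exact h2.symm
    rw [hlen]
    refine pv_permutations_mem_step d _ (d.idxOf e) e p' hidx hsome ?_
    rw [herase]
    exact ih (d.erase e) (hnd.erase e) hp'

theorem pv_mem_permutations_iff (d p : List Int) (hnd : d.Nodup) :
    p ∈ PySem.List.permutations d d.length ↔ p.Perm d :=
  ⟨PySem.List.perm_of_mem_permutations, pv_mem_permutations_of_perm p d hnd⟩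

-- the visibility scan of A, started from an arbitrary running state
def visFromA (m cnt : Int) (l : List Int) : Int :=
  (l.foldl (fun (p : Int × Int) x => (p.1 + (if p.2 < x then 1 else 0), max p.2 x)) (cnt, m)).1

theorem getClueA_eq_visFromA (row : List Int) : getClueA row = visFromA 0 0 row := rfl

theorem visFromA_cons (m cnt x : Int) (l : List Int) :
    visFromA m cnt (x :: l) = visFromA (max m x) (cnt + if m < x then 1 else 0) l := rfl

theorem visFromA_nil (m cnt : Int) : visFromA m cnt [] = cnt := rfl

theorem le_visFromA (l : List Int) : ∀ m cnt : Int, cnt ≤ visFromA m cnt l := by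
  induction l with
  | nil => intro m cnt; simp [visFromA_nil]
  | cons x l ih =>
    intro m cnt
    rw [visFromA_cons]
    split_ifs with h
    · have := ih (max m x) (cnt + 1); omega
    · have := ih (max m x) (cnt + 0); simpa using this

-- filling the 0-slots of a line in order
theorem fill_nil (p : List Int) : fillZerosA [] p = [] := by
  induction p with
  | nil => rfl
  | cons e es ih => simpa [fillZerosA, setFirstZeroA] using ih

theorem fill_cons_ne (x : Int) (hx : x ≠ 0) (s : List Int) :
    ∀ p : List Int, fillZerosA (x :: s) p = x :: fillZerosA s p := by
  intro p
  induction p generalizing s with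
  | nil => rfl
  | cons e es ih =>
    show fillZerosA (setFirstZeroA (x :: s) e) es = x :: fillZerosA (setFirstZeroA s e) es
    rw [setFirstZeroA, if_neg hx]
    exact ih (setFirstZeroA s e)

theorem fill_zero_cons (s : List Int) (e : Int) (p : List Int) :
    fillZerosA (0 :: s) (e :: p) = fillZerosA (e :: s) p := by
  show fillZerosA (setFirstZeroA (0 :: s) e) p = _
  rw [setFirstZeroA, if_pos rfl]

-- B's DFS reaches `clue` iff some completion of the line has visibility `clue`
theorem visB_iff (clue : Int) :
    ∀ s : List Int, ∀ m cnt : Int, ∀ rem : List Int,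
      s.count 0 = rem.length → rem.Nodup → (∀ e ∈ rem, e ≠ 0) →
      (visB clue s m cnt rem = true ↔ ∃ p, p.Perm rem ∧ visFromA m cnt (fillZerosA s p) = clue) := by
  intro s
  induction s with
  | nil =>
    intro m cnt rem hcount hnd hnz
    have hrem : rem = [] := List.length_eq_zero_iff.mp (by simpa using hcount.symm)
    subst hrem
    rw [visB]
    by_cases hpr : clue < cnt
    · simp only [if_pos hpr, Bool.false_eq_true, false_iff]
      rintro ⟨p, hp, hv⟩
      rw [List.perm_nil] at hp
      subst hp
      rw [fill_nil, visFromA_nil] at hv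
      omega
    · simp only [if_neg hpr, beq_iff_eq]
      constructor
      · intro h; exact ⟨[], List.Perm.refl [], by rw [fill_nil, visFromA_nil]; exact h⟩
      · rintro ⟨p, hp, hv⟩
        rw [List.perm_nil] at hp
        subst hp
        rwa [fill_nil, visFromA_nil] at hv
  | cons x s' ih =>
    intro m cnt rem hcount hnd hnz
    rw [visB]
    by_cases hpr : clue < cnt
    · simp only [if_pos hpr, Bool.false_eq_true, false_iff]
      rintro ⟨p, hp, hv⟩
      have := le_visFromA (fillZerosA (x :: s') p) m cnt
      omega
    · rw [if_neg hpr]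
      by_cases hx : x = 0
      · subst hx
        simp only [bne_self_eq_false, Bool.false_eq_true, if_false]
        have hcount' : s'.count 0 + 1 = rem.length := by
          simpa [List.count_cons] using hcount
        rw [List.any_eq_true]
        constructor
        · rintro ⟨e, he, hgo⟩
          have hfe : rem.filter (fun f => !(f == e)) = rem.erase e := by
            rw [List.Nodup.erase_eq_filter hnd e]
            rfl
          rw [hfe] at hgo
          have hlen : (rem.erase e).length = rem.length - 1 := List.length_erase_of_mem he
          obtain ⟨p', hp', hv'⟩ := (ih (max m e) (cnt + if m < e then 1 else 0) (rem.erase e)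
            (by omega) (hnd.erase e) (fun f hf => hnz f (List.mem_of_mem_erase hf))).mp hgo
          refine ⟨e :: p', List.cons_perm_iff_perm_erase.mpr ⟨he, hp'⟩, ?_⟩
          rw [fill_zero_cons, fill_cons_ne e (hnz e he) s' p', visFromA_cons]
          exact hv'
        · rintro ⟨p, hp, hv⟩
          cases p with
          | nil =>
            have : rem = [] := hp.nil_eq.symm
            subst this
            simp at hcount'
          | cons e p' =>
            rw [List.cons_perm_iff_perm_erase] at hp
            obtain ⟨he, hp'⟩ := hp
            refine ⟨e, he, ?_⟩
            have hfe : rem.filter (fun f => !(f == e)) = rem.erase e := by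
              rw [List.Nodup.erase_eq_filter hnd e]
              rfl
            rw [hfe]
            have hlen : (rem.erase e).length = rem.length - 1 := List.length_erase_of_mem he
            apply (ih (max m e) (cnt + if m < e then 1 else 0) (rem.erase e)
              (by omega) (hnd.erase e) (fun f hf => hnz f (List.mem_of_mem_erase hf))).mpr
            refine ⟨p', hp', ?_⟩
            rw [fill_zero_cons, fill_cons_ne e (hnz e he) s' p', visFromA_cons] at hv
            exact hv
      · have hx' : (x != 0) = true := by simpa using hx
        simp only [hx', if_pos]
        have hcount' : s'.count 0 = rem.length := by
          simpa [List.count_cons, hx] using hcount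
        rw [ih (max m x) (cnt + if m < x then 1 else 0) rem hcount' hnd hnz]
        constructor
        · rintro ⟨p, hp, hv⟩
          exact ⟨p, hp, by rw [fill_cons_ne x hx s' p, visFromA_cons]; exact hv⟩
        · rintro ⟨p, hp, hv⟩
          rw [fill_cons_ne x hx s' p, visFromA_cons] at hv
          exact ⟨p, hp, hv⟩

-- the candidate pool: |rem| = number of 0-slots, when the line is well formed
theorem pv_length_filter_contains (U L : List Int) (hUnd : U.Nodup) (hLnd : L.Nodup)
    (hsub : ∀ u ∈ U, u ∈ L) :
    (L.filter (fun x => U.contains x)).length = U.length := by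
  have h1 : (L.filter (fun x => U.contains x)).Nodup := List.Nodup.filter _ hLnd
  have h2 : (L.filter (fun x => U.contains x)).Perm U := by
    rw [List.perm_ext_iff_of_nodup h1 hUnd]
    intro a
    rw [List.mem_filter]
    constructor
    · rintro ⟨_, hx⟩; exact List.contains_iff_mem.mp hx
    · intro ha; exact ⟨hsub a ha, List.contains_iff_mem.mpr ha⟩
  exact h2.length_eq

theorem pv_filter_count_len (line : List Int) :
    (line.filter (fun y => !(y == 0))).length + line.count 0 = line.length := by
  induction line with
  | nil => rfl
  | cons x xs ih =>
    by_cases hx0 : x = 0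
    · simp only [hx0, List.filter_cons, List.count_cons]
      simp only [BEq.rfl, Bool.not_true, Bool.false_eq_true, if_false, List.length_cons]
      simp only [beq_self_eq_true, if_true]
      omega
    · have : ((x : Int) == 0) = false := by simpa using hx0
      simp only [List.filter_cons, List.count_cons, this, Bool.not_false, if_true, List.length_cons]
      simp only [Bool.false_eq_true, if_false]
      omega

theorem pv_rem_spec (line : List Int)
    (hbd : ∀ x ∈ line, 0 ≤ x ∧ x ≤ (line.length : Int))
    (hnd : (line.filter (fun x => !(x == 0))).Nodup) :
    ((PySem.List.pyRange 1 ((line.length : Int) + 1) 1).filter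
        (fun x => !((line.filter (fun y => !(y == 0))).contains x))).Nodup
    ∧ (∀ e ∈ (PySem.List.pyRange 1 ((line.length : Int) + 1) 1).filter
        (fun x => !((line.filter (fun y => !(y == 0))).contains x)), e ≠ 0)
    ∧ line.count 0 = ((PySem.List.pyRange 1 ((line.length : Int) + 1) 1).filter
        (fun x => !((line.filter (fun y => !(y == 0))).contains x))).length := by
  have hRnd : (PySem.List.pyRange 1 ((line.length : Int) + 1) 1).Nodup :=
    PySem.List.nodup_pyRange_one 1 ((line.length : Int) + 1)
  refine ⟨List.Nodup.filter _ hRnd, ?_, ?_⟩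
  · intro e he
    have := (List.mem_filter.mp he).1
    have h1 := (PySem.List.mem_pyRange_one.mp this).1
    omega
  · have hRlen : (PySem.List.pyRange 1 ((line.length : Int) + 1) 1).length = line.length := by
      rw [PySem.List.length_pyRange_one]; omega
    have hsplit := List.length_eq_countP_add_countP
      (fun x => (line.filter (fun y => !(y == 0))).contains x)
      (l := PySem.List.pyRange 1 ((line.length : Int) + 1) 1)
    have hc2 : (PySem.List.pyRange 1 ((line.length : Int) + 1) 1).countP
        (fun a => decide ¬((line.filter (fun y => !(y == 0))).contains a) = true)
        = ((PySem.List.pyRange 1 ((line.length : Int) + 1) 1).filter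
            (fun x => !((line.filter (fun y => !(y == 0))).contains x))).length := by
      rw [← List.countP_eq_length_filter]
      exact List.countP_congr (fun a _ => by simp)
    have hc1 : (PySem.List.pyRange 1 ((line.length : Int) + 1) 1).countP
        (fun x => (line.filter (fun y => !(y == 0))).contains x)
        = (line.filter (fun y => !(y == 0))).length := by
      rw [List.countP_eq_length_filter]
      apply pv_length_filter_contains _ _ hnd hRnd
      intro u hu
      rw [List.mem_filter] at hu
      obtain ⟨hu1, hu2⟩ := hu
      have := hbd u hu1
      rw [PySem.List.mem_pyRange_one]
      have hu0 : u ≠ 0 := by simpa using hu2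
      omega
    have hused : (line.filter (fun y => !(y == 0))).length + line.count 0 = line.length :=
      pv_filter_count_len line
    omega

-- B's missing-value pool (filter by membership in the line) is A's (filter by nonzero members)
theorem pv_missing_eq (line : List Int) :
    (PySem.List.pyRange 1 ((line.length : Int) + 1) 1).filter (fun x => !(line.contains x))
      = (PySem.List.pyRange 1 ((line.length : Int) + 1) 1).filter
          (fun x => !((line.filter (fun y => !(y == 0))).contains x)) := by
  apply List.filter_congr
  intro x hx
  have hx1 := (PySem.List.mem_pyRange_one.mp hx).1
  have hx0 : x ≠ 0 := by omega
  congr 1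
  cases hmem : line.contains x with
  | true =>
    have hm := List.contains_iff_mem.mp hmem
    exact (List.contains_iff_mem.mpr (List.mem_filter.mpr ⟨hm, by simpa using hx0⟩)).symm
  | false =>
    cases hmem2 : (line.filter (fun y => !(y == 0))).contains x with
    | false => rfl
    | true =>
      have := (List.mem_filter.mp (List.contains_iff_mem.mp hmem2)).1
      rw [List.contains_iff_mem.mpr this] at hmem
      cases hmem

-- A's possible-clue set membership IS B's pruned DFS
theorem contains_eq_vis (clue : Int) (line rem : List Int)
    (hbd : ∀ x ∈ line, 0 ≤ x ∧ x ≤ (line.length : Int))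
    (hnd : (line.filter (fun x => !(x == 0))).Nodup)
    (hrem : rem = (PySem.List.pyRange 1 ((line.length : Int) + 1) 1).filter
        (fun x => !(line.contains x))) :
    (possibleCluesA line).contains clue = visB clue line 0 0 rem := by
  obtain ⟨hRnd, hRnz, hRcnt⟩ := pv_rem_spec line hbd hnd
  have hrem' : rem = (PySem.List.pyRange 1 ((line.length : Int) + 1) 1).filter
      (fun x => !((line.filter (fun y => !(y == 0))).contains x)) := by
    rw [hrem, pv_missing_eq]
  subst hrem'
  apply Bool.coe_iff_coe.mp
  unfold possibleCluesA
  rw [List.contains_iff_mem, PySem.Set.mem_ofList, List.mem_map]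
  rw [visB_iff clue line 0 0 _ hRcnt hRnd hRnz]
  constructor
  · rintro ⟨p, hp, hv⟩
    exact ⟨p, (pv_mem_permutations_iff _ p hRnd).mp hp, by rw [getClueA_eq_visFromA] at hv; exact hv⟩
  · rintro ⟨p, hp, hv⟩
    exact ⟨p, (pv_mem_permutations_iff _ p hRnd).mpr hp, by rw [← getClueA_eq_visFromA] at hv; exact hv⟩

-- the two comprehensions are the original row/column with num written at the empty cell
theorem pv_rowlist_eq (board : List (List Int)) (r c : Nat) (num : Int)
    (hrl : (board.getD r []).length = board.length) (hc : c < board.length) :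
    (List.range board.length).map (fun i => if i = c then num else cellA board r i)
      = (board.getD r []).set c num := by
  apply List.ext_getElem
  · simp only [List.length_map, List.length_range, List.length_set, hrl]
  · intro j h1 h2
    simp only [List.getElem_map, List.getElem_range, List.getElem_set]
    by_cases hjc : j = c
    · simp [hjc]
    · rw [if_neg hjc, if_neg (fun h => hjc h.symm), cellA,
        List.getD_eq_getElem _ _ (by simp only [List.length_map, List.length_range] at h1; omega)]

theorem pv_collist_eq (board : List (List Int)) (r c : Nat) (num : Int)
    (hr : r < board.length) :
    (List.range board.length).map (fun i => if i = r then num else cellA board i c)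
      = (board.map (fun row => row.getD c 1)).set r num := by
  apply List.ext_getElem
  · simp
  · intro j h1 h2
    simp only [List.getElem_map, List.getElem_range, List.getElem_set]
    by_cases hjr : j = r
    · simp [hjr]
    · rw [if_neg hjr, if_neg (fun h => hjr h.symm), cellA]
      have hj : j < board.length := by simpa using h1
      rw [List.getD_eq_getElem _ _ hj]

theorem pv_bounds_set (L : List Int) (c : Nat) (num B : Int)
    (hb : ∀ x ∈ L, 0 ≤ x ∧ x ≤ B) (h1 : 0 ≤ num) (h2 : num ≤ B) :
    ∀ x ∈ L.set c num, 0 ≤ x ∧ x ≤ B := fun x hx =>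
  (List.mem_or_eq_of_mem_set hx).elim (hb x) (fun h => h ▸ ⟨h1, h2⟩)

-- the updated line keeps distinct nonzero entries once its duplicate test has passed
theorem pv_nodup_filter_set (L : List Int) (c : Nat) (num : Int) (hc : c < L.length)
    (h0 : L[c]'hc = 0) (hnum : num ≠ 0)
    (hnd : (L.filter (fun x => !(x == 0))).Nodup)
    (hcnt : (L.set c num).count num ≤ 1) :
    ((L.set c num).filter (fun x => !(x == 0))).Nodup := by
  rw [List.nodup_iff_count_le_one] at hnd ⊢
  intro x
  by_cases hx0 : x = 0
  · subst hx0
    rw [List.count_eq_zero.mpr]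
    · omega
    · intro hmem
      have := (List.mem_filter.mp hmem).2
      simp at this
  · rw [List.count_filter (by simpa using hx0)]
    by_cases hxn : x = num
    · subst hxn; exact hcnt
    · rw [List.count_set hc]
      have he1 : (L[c]'hc == x) = false := by
        rw [h0]; simpa using fun h => hx0 h.symm
      have he2 : (num == x) = false := by simpa using fun h => hxn h.symm
      rw [he1, he2]
      simp only [Bool.false_eq_true, if_false]
      have := hnd x
      rw [List.count_filter (by simpa using hx0)] at this
      omega

theorem pv_getD_reverse (l : List Int) (k : Nat) (hk : k < l.length) :
    l.reverse.getD k 0 = l.getD (l.length - 1 - k) 0 := by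
  rw [List.getD_eq_getElem _ _ (by simpa using hk), List.getD_eq_getElem _ _ (by omega)]
  rw [List.getElem_reverse]

theorem pv_pair (q : Int) (b : Bool) : (q == 0 || b) = !(q != 0 && !b) := by
  have hb : (q != 0) = !(q == 0) := rfl
  rw [hb]
  cases (q == 0) <;> cases b <;> rfl

theorem pv_chain (X1 X2 X3 X4 : Bool) :
    (if X1 = true then false
     else if X2 = true then false
     else if X3 = true then false
     else if X4 = true then false
     else true)
      = (!X1 && (!X2 && (!X3 && !X4))) := by
  cases X1 <;> cases X2 <;> cases X3 <;> cases X4 <;> simp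

theorem valid_eq_placeOk (clues : List Int) (board : List (List Int)) (num : Int) (r c : Nat)
    (hcl : clues.length = 4 * board.length)
    (hrows : ∀ row ∈ board, row.length = board.length
      ∧ (∀ x ∈ row, 0 ≤ x ∧ x ≤ (board.length : Int))
      ∧ (row.filter (fun x => !(x == 0))).Nodup)
    (hcols : ∀ j < board.length,
      ((board.map (fun row => row.getD j 1)).filter (fun x => !(x == 0))).Nodup)
    (hr : r < board.length) (hc : c < board.length)
    (hnum1 : 1 ≤ num) (hnumn : num ≤ (board.length : Int))
    (h0 : (board.getD r []).getD c 1 = 0) :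
    validA clues board num (r, c) = placeOkB clues board board.length r c num := by
  have hrow0 : board.getD r [] ∈ board := by
    rw [List.getD_eq_getElem _ _ hr]; exact List.getElem_mem hr
  obtain ⟨hrl, hrb, hrnd⟩ := hrows _ hrow0
  have hclt : c < (board.getD r []).length := by omega
  have h0' : (board.getD r [])[c]'hclt = 0 := by
    rw [← List.getD_eq_getElem _ _ hclt]; exact h0
  have hrlt : r < (board.map (fun row => row.getD c 1)).length := by simpa using hr
  have hcol0r : (board.map (fun row => row.getD c 1))[r]'hrlt = 0 := by
    simp only [List.getElem_map]
    rw [← List.getD_eq_getElem board [] hr]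
    exact h0
  have hcolnd := hcols c hc
  have hcb0 : ∀ x ∈ board.map (fun row => row.getD c 1), 0 ≤ x ∧ x ≤ (board.length : Int) := by
    intro x hx
    rw [List.mem_map] at hx
    obtain ⟨row, hrowm, hxeq⟩ := hx
    obtain ⟨hl, hb, _⟩ := hrows row hrowm
    subst hxeq
    rw [List.getD_eq_getElem _ _ (by omega)]
    exact hb _ (List.getElem_mem _)
  have hnum0 : num ≠ 0 := by omega
  simp only [validA, placeOkB]
  rw [pv_rowlist_eq board r c num hrl hc, pv_collist_eq board r c num hr,
      pv_rowO_eq board r hrl, pv_colO_eq board c]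
  -- the duplicate tests
  have hdr := pv_dup_contains (board.getD r []) c num hclt h0' hnum0
  have hdc := pv_dup_contains (board.map (fun row => row.getD c 1)) r num hrlt hcol0r hnum0
  by_cases h1 : 1 < ((board.getD r []).set c num).count num
  · have : (board.getD r []).contains num = true := by rw [← hdr]; exact decide_eq_true h1
    rw [if_pos h1, this]
    simp
  · have hcr : (board.getD r []).contains num = false := by rw [← hdr]; exact decide_eq_false h1
    rw [if_neg h1, hcr]
    by_cases h2 : 1 < ((board.map (fun row => row.getD c 1)).set r num).count num
    · have : (board.map (fun row => row.getD c 1)).contains num = true := by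
        rw [← hdc]; exact decide_eq_true h2
      rw [if_pos h2, this]
      simp
    · have hcc : (board.map (fun row => row.getD c 1)).contains num = false := by
        rw [← hdc]; exact decide_eq_false h2
      rw [if_neg h2, hcc]
      simp only [Bool.or_self, Bool.false_eq_true, if_false]
      -- line properties
      have hrowlen : ((board.getD r []).set c num).length = board.length := by
        rw [List.length_set]; exact hrl
      have hcollen : ((board.map (fun row => row.getD c 1)).set r num).length = board.length := by
        rw [List.length_set, List.length_map]
      have hb_row : ∀ x ∈ (board.getD r []).set c num,
          0 ≤ x ∧ x ≤ ((((board.getD r []).set c num).length : Nat) : Int) := by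
        rw [hrowlen]
        exact pv_bounds_set _ c num _ hrb (by omega) hnumn
      have hnd_row : (((board.getD r []).set c num).filter (fun x => !(x == 0))).Nodup :=
        pv_nodup_filter_set _ c num hclt h0' hnum0 hrnd (by omega)
      have hb_col : ∀ x ∈ (board.map (fun row => row.getD c 1)).set r num,
          0 ≤ x ∧ x ≤ ((((board.map (fun row => row.getD c 1)).set r num).length : Nat) : Int) := by
        rw [hcollen]
        exact pv_bounds_set _ r num _ hcb0 (by omega) hnumn
      have hnd_col : (((board.map (fun row => row.getD c 1)).set r num).filter (fun x => !(x == 0))).Nodup :=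
        pv_nodup_filter_set _ r num hrlt hcol0r hnum0 hcolnd (by omega)
      have hb_rowrev : ∀ x ∈ ((board.getD r []).set c num).reverse,
          0 ≤ x ∧ x ≤ (((((board.getD r []).set c num).reverse).length : Nat) : Int) := by
        simp only [List.mem_reverse, List.length_reverse]
        exact hb_row
      have hnd_rowrev : ((((board.getD r []).set c num).reverse).filter (fun x => !(x == 0))).Nodup := by
        rw [List.filter_reverse]
        exact List.nodup_reverse.mpr hnd_row
      have hb_colrev : ∀ x ∈ ((board.map (fun row => row.getD c 1)).set r num).reverse,
          0 ≤ x ∧ x ≤ ((((((board.map (fun row => row.getD c 1)).set r num).reverse)).length : Nat) : Int) := by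
        simp only [List.mem_reverse, List.length_reverse]
        exact hb_col
      have hnd_colrev : ((((board.map (fun row => row.getD c 1)).set r num).reverse).filter (fun x => !(x == 0))).Nodup := by
        rw [List.filter_reverse]
        exact List.nodup_reverse.mpr hnd_col
      have hn1 : 1 ≤ board.length := by omega
      -- the missing pools B passes match each line (reversal keeps membership)
      have hrevcontains : ∀ (L : List Int),
          (fun x => !(L.reverse.contains x)) = (fun x : Int => !(L.contains x)) := by
        intro L; funext x; simp [List.contains_iff_mem]
      have hm1 : (PySem.List.pyRange 1 ((board.length : Int) + 1) 1).filter
            (fun x => !(((board.map (fun row => row.getD c 1)).set r num).contains x))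
          = (PySem.List.pyRange 1 (((((board.map (fun row => row.getD c 1)).set r num).length : Nat) : Int) + 1) 1).filter
            (fun x => !(((board.map (fun row => row.getD c 1)).set r num).contains x)) := by
        rw [hcollen]
      have hm2 : (PySem.List.pyRange 1 ((board.length : Int) + 1) 1).filter
            (fun x => !(((board.map (fun row => row.getD c 1)).set r num).contains x))
          = (PySem.List.pyRange 1 (((((board.map (fun row => row.getD c 1)).set r num).reverse.length : Nat) : Int) + 1) 1).filter
            (fun x => !(((board.map (fun row => row.getD c 1)).set r num).reverse.contains x)) := by
        rw [hrevcontains, List.length_reverse, hcollen]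
      have hm3 : (PySem.List.pyRange 1 ((board.length : Int) + 1) 1).filter
            (fun x => !(((board.getD r []).set c num).contains x))
          = (PySem.List.pyRange 1 (((((board.getD r []).set c num).length : Nat) : Int) + 1) 1).filter
            (fun x => !(((board.getD r []).set c num).contains x)) := by
        rw [hrowlen]
      have hm4 : (PySem.List.pyRange 1 ((board.length : Int) + 1) 1).filter
            (fun x => !(((board.getD r []).set c num).contains x))
          = (PySem.List.pyRange 1 (((((board.getD r []).set c num).reverse.length : Nat) : Int) + 1) 1).filter
            (fun x => !(((board.getD r []).set c num).reverse.contains x)) := by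
        rw [hrevcontains, List.length_reverse, hrowlen]
      -- clue positions taken from the reversed clue list
      have hq3 : clues.reverse.getD (c + board.length) 0
          = clues.getD (3 * board.length - 1 - c) 0 := by
        rw [pv_getD_reverse clues (c + board.length) (by omega)]
        congr 1
        omega
      have hq4 : clues.reverse.getD r 0 = clues.getD (4 * board.length - 1 - r) 0 := by
        rw [pv_getD_reverse clues r (by omega)]
        congr 1
        omega
      rw [hq3, hq4]
      rw [contains_eq_vis (clues.getD c 0) _ _ hb_col hnd_col hm1,
          contains_eq_vis (clues.getD (r + board.length) 0) _ _ hb_rowrev hnd_rowrev hm4,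
          contains_eq_vis (clues.getD (3 * board.length - 1 - c) 0) _ _ hb_colrev hnd_colrev hm2,
          contains_eq_vis (clues.getD (4 * board.length - 1 - r) 0) _ _ hb_row hnd_row hm3]
      rw [pv_chain]
      unfold lineOkB
      rw [pv_pair, pv_pair, pv_pair, pv_pair]

-- a successful placement preserves the well-formedness invariant
theorem pv_preserve (clues : List Int) (board : List (List Int)) (num : Int) (r c : Nat)
    (hrows : ∀ row ∈ board, row.length = board.length
      ∧ (∀ x ∈ row, 0 ≤ x ∧ x ≤ (board.length : Int))
      ∧ (row.filter (fun x => !(x == 0))).Nodup)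
    (hcols : ∀ j < board.length,
      ((board.map (fun row => row.getD j 1)).filter (fun x => !(x == 0))).Nodup)
    (hr : r < board.length) (hc : c < board.length)
    (hnum1 : 1 ≤ num) (hnumn : num ≤ (board.length : Int))
    (h0 : (board.getD r []).getD c 1 = 0)
    (hvalid : validA clues board num (r, c) = true) :
    (∀ row ∈ setCellA board r c num, row.length = (setCellA board r c num).length
      ∧ (∀ x ∈ row, 0 ≤ x ∧ x ≤ ((setCellA board r c num).length : Int))
      ∧ (row.filter (fun x => !(x == 0))).Nodup)
    ∧ (∀ j < (setCellA board r c num).length,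
      (((setCellA board r c num).map (fun row => row.getD j 1)).filter (fun x => !(x == 0))).Nodup) := by
  have hrow0 : board.getD r [] ∈ board := by
    rw [List.getD_eq_getElem _ _ hr]; exact List.getElem_mem hr
  obtain ⟨hrl, hrb, hrnd⟩ := hrows _ hrow0
  have hclt : c < (board.getD r []).length := by omega
  have h0' : (board.getD r [])[c]'hclt = 0 := by
    rw [← List.getD_eq_getElem _ _ hclt]; exact h0
  have hrlt : r < (List.map (fun row => row.getD c 1) board).length := by simpa using hr
  have hcol0r : (List.map (fun row => row.getD c 1) board)[r]'hrlt = 0 := by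
    simp only [List.getElem_map]
    rw [← List.getD_eq_getElem board [] hr]
    exact h0
  have hnum0 : num ≠ 0 := by omega
  -- the two duplicate tests passed
  simp only [validA] at hvalid
  rw [pv_rowlist_eq board r c num hrl hc, pv_collist_eq board r c num hr] at hvalid
  have h1 : ¬ 1 < ((board.getD r []).set c num).count num := by
    intro h1
    rw [if_pos h1] at hvalid
    simp at hvalid
  rw [if_neg h1] at hvalid
  have h2 : ¬ 1 < ((List.map (fun row => row.getD c 1) board).set r num).count num := by
    intro h2
    rw [if_pos h2] at hvalid
    simp at hvalid
  have hlen : (setCellA board r c num).length = board.length := by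
    unfold setCellA; rw [List.length_set]
  constructor
  · intro row hrow
    rw [hlen]
    rcases List.mem_or_eq_of_mem_set hrow with hold | hnew
    · obtain ⟨hl, hb, hn⟩ := hrows row hold
      exact ⟨hl, hb, hn⟩
    · subst hnew
      refine ⟨by rw [List.length_set]; exact hrl, ?_, ?_⟩
      · exact pv_bounds_set _ c num _ hrb (by omega) hnumn
      · exact pv_nodup_filter_set _ c num hclt h0' hnum0 hrnd (by omega)
  · intro j hj
    rw [hlen] at hj
    unfold setCellA
    rw [List.map_set]
    by_cases hjc : j = c
    · rw [hjc]
      have hnewget : ((board.getD r []).set c num).getD c 1 = num := by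
        rw [List.getD_eq_getElem _ _ (by rw [List.length_set]; omega)]
        exact List.getElem_set_self _
      simp only [hnewget]
      exact pv_nodup_filter_set _ r num hrlt hcol0r hnum0 (hcols c (by omega)) (by omega)
    · have hnewget : ((board.getD r []).set c num).getD j 1 = (board.getD r []).getD j 1 := by
        have hjlt : j < (board.getD r []).length := by omega
        have hjlt2 : j < ((board.getD r []).set c num).length := by
          rw [List.length_set]; omega
        rw [List.getD_eq_getElem _ _ hjlt2, List.getElem_set_ne (fun h => hjc h.symm),
            List.getD_eq_getElem _ _ hjlt]
      simp only [hnewget]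
      have hsame : (List.map (fun row => row.getD j 1) board).set r ((board.getD r []).getD j 1)
          = List.map (fun row => row.getD j 1) board := by
        have hgr : (List.map (fun row => row.getD j 1) board)[r]'(by simpa using hr)
            = (board.getD r []).getD j 1 := by
          simp only [List.getElem_map]
          rw [← List.getD_eq_getElem board [] hr]
        rw [← hgr]
        exact List.set_getElem_self _
      simp only [hsame]
      exact hcols j hj

-- fit on a completely filled (scanned) board is True for every k
theorem pv_fit_true (clues : List Int) : ∀ (N : Nat) (board : List (List Int)) (k : Nat),
    board.length * board.length - k ≤ N →
    (∀ i j, i < board.length → j < board.length → (board.getD i []).getD j 1 ≠ 0) →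
    fitB clues board.length board k = true := by
  intro N
  induction N with
  | zero =>
    intro board k hN hfull
    rw [fitB, if_pos (by omega)]
  | succ N ih =>
    intro board k hN hfull
    by_cases hk : board.length * board.length ≤ k
    · rw [fitB, if_pos hk]
    · have hn : 0 < board.length := by
        by_contra h
        have : board.length = 0 := by omega
        rw [this] at hk
        omega
      have hr : k / board.length < board.length := Nat.div_lt_iff_lt_mul hn |>.mpr (by omega)
      have hc : k % board.length < board.length := Nat.mod_lt _ hn
      have hcell : ((board.getD (k / board.length) []).getD (k % board.length) 1 != 0) = true := by
        simpa using hfull _ _ hr hc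
      rw [fitB, if_neg hk]
      simp only [hcell, if_pos]
      exact ih board (k + 1) (by omega) hfull

-- the two solvers agree on every well-formed board (fuel = remaining flat indices)
theorem pv_fit_eq (clues : List Int) : ∀ (N : Nat) (board : List (List Int)) (k : Nat),
    board.length * board.length - k ≤ N →
    clues.length = 4 * board.length →
    (∀ row ∈ board, row.length = board.length
      ∧ (∀ x ∈ row, 0 ≤ x ∧ x ≤ (board.length : Int))
      ∧ (row.filter (fun x => !(x == 0))).Nodup) →
    (∀ j < board.length,
      ((board.map (fun row => row.getD j 1)).filter (fun x => !(x == 0))).Nodup) →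
    (∀ m, m < k → (board.getD (m / board.length) []).getD (m % board.length) 1 ≠ 0) →
    fitB clues board.length board k = solve clues board := by
  intro N
  induction N with
  | zero =>
    intro board k hN hcl hrows hcols hinv
    have hk : board.length * board.length ≤ k := by omega
    rw [fitB, if_pos hk, solve]
    have hfe : findEmptyA board = none := by
      apply pv_no_empty
      intro i j hi hj
      have hm : i * board.length + j < board.length * board.length := by
        have h1 : (i + 1) * board.length = i * board.length + board.length := Nat.succ_mul _ _
        have h2 : (i + 1) * board.length ≤ board.length * board.length :=
          Nat.mul_le_mul_right _ (by omega)
        omega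
      obtain ⟨hd, hmd⟩ := pv_flat_div board.length i j (by omega) hj
      have := hinv (i * board.length + j) (by omega)
      rw [hd, hmd] at this
      exact this
    rw [hfe]
  | succ N ih =>
    intro board k hN hcl hrows hcols hinv
    by_cases hk : board.length * board.length ≤ k
    · exact ih board k (by omega) hcl hrows hcols hinv
    · have hn : 0 < board.length := by
        by_contra h
        have : board.length = 0 := by omega
        rw [this] at hk
        omega
      set n := board.length with hnn
      have hsq : n * n = board.length * board.length := by rw [hnn]
      have hr : k / n < n := Nat.div_lt_iff_lt_mul hn |>.mpr (by omega)
      have hc : k % n < n := Nat.mod_lt _ hn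
      rw [fitB, if_neg hk]
      by_cases hcell : (board.getD (k / n) []).getD (k % n) 1 = 0
      · -- the next cell to fill is exactly (k / n, k % n)
        have hfe : findEmptyA board = some (k / n, k % n) :=
          pv_find_at board k (by omega) hinv hcell
        have hcell' : ((board.getD (k / n) []).getD (k % n) 1 != 0) = false := by
          simpa using hcell
        simp only [hcell', Bool.false_eq_true, if_false]
        rw [solve, hfe]
        change (PySem.List.pyRange 1 ((n : Int) + 1) 1).any _ =
          (PySem.List.pyRange 1 ((n : Int) + 1) 1).attach.any (fun i =>
            validA clues board i.1 (k / n, k % n) && solve clues (setCellA board (k / n) (k % n) i.1))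
        refine Eq.trans ?_ (pv_any_attach _ (fun v =>
          validA clues board v (k / n, k % n) && solve clues (setCellA board (k / n) (k % n) v))).symm
        have hkey : ∀ v ∈ PySem.List.pyRange 1 ((n : Int) + 1) 1,
            (placeOkB clues board n (k / n) (k % n) v
                && fitB clues n (setCellB board (k / n) (k % n) v) (k + 1))
              = (validA clues board v (k / n, k % n)
                && solve clues (setCellA board (k / n) (k % n) v)) := by
          intro v hv
          simp only [show setCellB = setCellA from rfl]
          obtain ⟨hv1, hv2⟩ := PySem.List.mem_pyRange_one.mp hv
          have hvn : v ≤ (n : Int) := by omega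
          rw [valid_eq_placeOk clues board v (k / n) (k % n) hcl hrows hcols hr hc hv1 hvn hcell]
          cases hvb : placeOkB clues board n (k / n) (k % n) v with
          | false => simp
          | true =>
            have hvalid : validA clues board v (k / n, k % n) = true := by
              rw [valid_eq_placeOk clues board v (k / n) (k % n) hcl hrows hcols hr hc hv1 hvn hcell]
              exact hvb
            obtain ⟨hrows', hcols'⟩ :=
              pv_preserve clues board v (k / n) (k % n) hrows hcols hr hc hv1 hvn hcell hvalid
            have hlen : (setCellA board (k / n) (k % n) v).length = n := by
              unfold setCellA; rw [List.length_set]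
            have hinv' : ∀ m, m < k + 1 →
                (((setCellA board (k / n) (k % n) v).getD (m / n) []).getD (m % n) 1) ≠ 0 := by
              intro m hm
              by_cases hmk : m < k
              · have hpairne : ¬(m / n = k / n ∧ m % n = k % n) := by
                  rintro ⟨hd, hmd⟩
                  have h1 := Nat.div_add_mod m n
                  have h2 := Nat.div_add_mod k n
                  rw [hd, hmd] at h1
                  omega
                rw [pv_cell_setCell board (k / n) (k % n) (m / n) (m % n) v hr hpairne]
                exact hinv m hmk
              · have hmk' : m = k := by omega
                rw [hmk']
                rw [pv_cell_setCell_self board (k / n) (k % n) v hr (by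
                  have hrow0 : board.getD (k / n) [] ∈ board := by
                    rw [List.getD_eq_getElem _ _ hr]; exact List.getElem_mem hr
                  have := (hrows _ hrow0).1
                  omega)]
                omega
            have := ih (setCellA board (k / n) (k % n) v) (k + 1)
              (by rw [hlen]; omega) (by rw [hlen]; exact hcl)
              (by rw [hlen] at hrows' ⊢; exact hrows')
              (by rw [hlen] at hcols' ⊢; exact hcols')
              (by rw [hlen]; exact hinv')
            rw [hlen] at this
            rw [this]
        apply Bool.coe_iff_coe.mp
        simp only [List.any_eq_true]
        constructor
        · rintro ⟨v, hv, h⟩; exact ⟨v, hv, by rw [← hkey v hv]; exact h⟩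
        · rintro ⟨v, hv, h⟩; exact ⟨v, hv, by rw [hkey v hv]; exact h⟩
      · -- cell already filled: fit skips it, solve is unchanged
        have hcell' : ((board.getD (k / n) []).getD (k % n) 1 != 0) = true := by
          simpa using hcell
        simp only [hcell', if_pos]
        have hinv' : ∀ m, m < k + 1 → (board.getD (m / n) []).getD (m % n) 1 ≠ 0 := by
          intro m hm
          by_cases hmk : m < k
          · exact hinv m hmk
          · have : m = k := by omega
            subst this
            exact hcell
        exact ih board (k + 1) (by omega) hcl hrows hcols hinv'

theorem solve_eq_alt (clues : List Int) (board : List (List Int)) (h : Pre_solve clues board) :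
    solve clues board = solve_alt clues board := by
  unfold solve_alt
  cases h with
  | inl hfull =>
    have hfull' : ∀ i j, i < board.length → j < board.length →
        (board.getD i []).getD j 1 ≠ 0 := by
      intro i j hi hj
      have hrmem : board.getD i [] ∈ board := by
        rw [List.getD_eq_getElem _ _ hi]; exact List.getElem_mem hi
      exact (hfull _ hrmem).2 j hj
    have hA : findEmptyA board = none := pv_no_empty board hfull'
    rw [solve, hA, pv_fit_true clues (board.length * board.length) board 0 (by omega) hfull']
  | inr hinv =>
    rw [pv_fit_eq clues (board.length * board.length) board 0 (by omega)
      hinv.1 hinv.2.1 hinv.2.2 (by intro m hm; omega)]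

-- ===== VERDICT (by name: the statement is the Claim_ definition above) =====
theorem solve_spec : Claim_equal_solve := by
  intro clues board _hd hp
  unfold Spec_solve
  exact solve_eq_alt clues board hp
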